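-- pv_equiv track=rewrite | github.com/eromonge/devel | D.py | skip_v2
-- ===== SOURCE A (Python) =====
-- from math import ceil, sqrt
--
-- def skip_v2(text, n):
-- 	r=''
-- 	for i in range(n):
-- 		for j in range(ceil(len(text)/n)):
-- 			index=i+j*n
-- 			if(index<len(text)):
-- 				r+=text[index]
-- 	return r
-- ===== SOURCE B (Python) =====
-- def skip_v2(text, n):
--     if n <= 0:
--         return ''
--     cols = [''] * n
--     while text:
--         chunk = text[:n]
--         for i in range(len(chunk)):
--             cols[i] += chunk[i]
--         text = text[n:]
--     return ''.join(cols)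
-- ===== Notes on version B (the rewrite author's own statement) =====
-- stated objective: alternative
-- what changed: A gathers output column by column with computed jump indices i+j*n and a ceiling-division loop bound; B makes a single row-major pass, slicing the text into chunks of n and appending each chunk's characters to per-column buffers that are joined at the end.
import Mathlib
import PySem

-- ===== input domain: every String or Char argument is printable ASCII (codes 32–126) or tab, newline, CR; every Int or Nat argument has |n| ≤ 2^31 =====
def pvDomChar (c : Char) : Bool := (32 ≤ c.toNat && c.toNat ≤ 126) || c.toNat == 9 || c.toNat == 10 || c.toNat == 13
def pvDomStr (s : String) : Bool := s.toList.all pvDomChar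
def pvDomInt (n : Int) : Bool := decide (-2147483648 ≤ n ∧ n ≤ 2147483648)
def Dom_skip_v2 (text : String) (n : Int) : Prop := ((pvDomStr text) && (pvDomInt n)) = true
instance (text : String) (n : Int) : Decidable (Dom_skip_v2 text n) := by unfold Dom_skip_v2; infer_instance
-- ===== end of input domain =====

-- B re-implements the column-major index-gather as a single row-major pass: slice the
-- text into chunks of n and append each chunk's characters to per-column buffers
-- (objective: alternative decomposition, same O(len) work, no index arithmetic).

-- ===== PORT A =====
-- math.ceil(len(text)/n) ported as the exact integer ceiling division -((-a)//b)
-- (exact wherever the Python float division is, i.e. on the admitted magnitudes).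
def skip_v2 (text : String) (n : Int) : String :=
  String.mk ((PySem.List.pyRange 0 n 1).foldl (fun r i =>
    (PySem.List.pyRange 0 (-(PySem.Int.floordiv (-(text.toList.length : Int)) n)) 1).foldl
      (fun r j =>
        if i + j * n < (text.toList.length : Int) then
          match PySem.List.pyGet? text.toList (i + j * n) with
          | some c => r ++ [c]
          | none => r
        else r) r) [])

-- ===== PORT B =====
-- cols[i] += chunk[i] for each position of the chunk (chunk may be shorter than cols)
def pvZipAppend : List (List Char) → List Char → List (List Char)
  | [], _ => []
  | bs, [] => bs
  | b :: bs, c :: cs => (b ++ [c]) :: pvZipAppend bs cs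

-- the `while text:` loop: take the chunk text[:n] (written c :: take (n-1) of the
-- tail, equal to it for the n ≥ 1 this is called with), scatter it onto the columns,
-- continue with text[n:]
def pvChunkLoop (n : Nat) (cols : List (List Char)) : List Char → List (List Char)
  | [] => cols
  | c :: t => pvChunkLoop n (pvZipAppend cols (c :: t.take (n - 1))) (t.drop (n - 1))
  termination_by L => L.length
  decreasing_by simp

def skip_v2_alt (text : String) (n : Int) : String :=
  if n ≤ 0 then "" else
    String.mk ((pvChunkLoop n.toNat (List.replicate n.toNat []) text.toList).flatten)

-- ===== PRECONDITION & SPEC =====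
def Spec_skip_v2 (text : String) (n : Int) (out : String) : Prop := out = skip_v2_alt text n
instance (text : String) (n : Int) (out : String) : Decidable (Spec_skip_v2 text n out) := by unfold Spec_skip_v2; infer_instance

-- ===== CLAIM (what is proved, stated in full; the proofs are below) =====
def Claim_equal_skip_v2 : Prop := ∀ (text : String) (n : Int), Dom_skip_v2 text n → Spec_skip_v2 text n (skip_v2 text n)

-- ===== LEMMAS AND PROOFS =====

-- column i of L: every N-th character starting at the front (proof-only helper)
def pvStrided (n : Nat) : List Char → List Char
  | [] => []
  | c :: t => c :: pvStrided n (t.drop (n - 1))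
  termination_by L => L.length
  decreasing_by simp

lemma pvStrided_nil (n : Nat) : pvStrided n [] = [] := by rw [pvStrided]

lemma pvStrided_cons (n : Nat) (c : Char) (t : List Char) :
    pvStrided n (c :: t) = c :: pvStrided n (t.drop (n - 1)) := by rw [pvStrided]

lemma pvStrided_drop (L : List Char) (N i : Nat) (hN : 1 ≤ N) :
    pvStrided N (L.drop i) = L[i]?.toList ++ pvStrided N (L.drop (i + N)) := by
  cases h : L[i]? with
  | none =>
    have hlen : L.length ≤ i := by
      by_contra hc
      simp [List.getElem?_eq_getElem (by omega : i < L.length)] at h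
    rw [List.drop_eq_nil_of_le hlen, List.drop_eq_nil_of_le (by omega : L.length ≤ i + N),
      pvStrided_nil]
    rfl
  | some c =>
    have hi : i < L.length := by
      by_contra hc
      push_neg at hc
      rw [List.getElem?_eq_none_iff.mpr hc] at h
      simp at h
    have hc : L[i] = c := by simpa [List.getElem?_eq_getElem hi] using h
    rw [List.drop_eq_getElem_cons hi, pvStrided_cons, List.drop_drop, hc,
      show (i + 1) + (N - 1) = i + N by omega]
    rfl

lemma pvFoldlExt {α β : Type} (f g : α → β → α) (h : ∀ r x, f r x = g r x) :
    ∀ (l : List β) (r : α), l.foldl f r = l.foldl g r := by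
  intro l
  induction l with
  | nil => intro r; rfl
  | cons x xs ih => intro r; simp only [List.foldl_cons, h, ih]

lemma pvInner (L : List Char) (N : Nat) (hN : 1 ≤ N) :
    ∀ (m i : Nat) (r : List Char), L.length ≤ i + m * N →
      (List.range m).foldl (fun r j => r ++ (L[i + j * N]?.toList)) r
        = r ++ pvStrided N (L.drop i) := by
  intro m
  induction m with
  | zero =>
    intro i r h
    simp only [Nat.zero_mul, Nat.add_zero] at h
    simp [List.drop_eq_nil_of_le h, pvStrided_nil]
  | succ m ih =>
    intro i r h
    rw [List.range_succ_eq_map, List.foldl_cons, List.foldl_map]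
    simp only [show ∀ j : Nat, i + (j + 1) * N = (i + N) + j * N from fun j => by ring,
      Nat.zero_mul, Nat.add_zero]
    rw [ih (i + N) (r ++ L[i]?.toList)
      (by have hmul : (m + 1) * N = m * N + N := by ring
          omega)]
    rw [List.append_assoc, ← pvStrided_drop L N i hN]

lemma pvFoldlAppend (g : Nat → List Char) :
    ∀ (l : List Nat) (r : List Char),
      l.foldl (fun r i => r ++ g i) r = r ++ (l.map g).flatten := by
  intro l
  induction l with
  | nil => intro r; simp
  | cons x xs ih => intro r; simp [ih, List.append_assoc]

lemma pvZipAppend_length (cols : List (List Char)) :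
    ∀ ch, (pvZipAppend cols ch).length = cols.length := by
  induction cols with
  | nil => intro ch; cases ch <;> rfl
  | cons b bs ih => intro ch; cases ch <;> simp [pvZipAppend, ih]

lemma pvZipAppend_get? (cols : List (List Char)) :
    ∀ ch (i : Nat), (pvZipAppend cols ch)[i]? = cols[i]?.map (fun b => b ++ ch[i]?.toList) := by
  induction cols with
  | nil => intro ch i; cases ch <;> simp [pvZipAppend]
  | cons b bs ih =>
    intro ch i
    cases ch with
    | nil => simp [pvZipAppend]
    | cons c cs =>
      cases i with
      | zero => simp [pvZipAppend]
      | succ i => simp [pvZipAppend, ih]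

lemma pvChunk_get? (N : Nat) (hN : 1 ≤ N) (cols : List (List Char)) (L : List Char) :
    cols.length ≤ N → ∀ (i : Nat),
      (pvChunkLoop N cols L)[i]? = cols[i]?.map (fun b => b ++ pvStrided N (L.drop i)) := by
  induction cols, L using pvChunkLoop.induct N with
  | case1 cols =>
    intro hc i
    rw [pvChunkLoop]
    cases hcb : cols[i]? <;> simp [pvStrided_nil]
  | case2 cols c t ih =>
    intro hc i
    rw [pvChunkLoop, ih (by rw [pvZipAppend_length]; exact hc) i, pvZipAppend_get?]
    rw [Option.map_map]
    cases hcb : cols[i]? with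
    | none => simp
    | some b =>
      have hiN : i < N := by
        obtain ⟨hlt, -⟩ := List.getElem?_eq_some_iff.mp hcb
        omega
      simp only [Option.map_some, Function.comp]
      congr 1
      have hch : (c :: t.take (N - 1))[i]? = (c :: t)[i]? := by
        cases i with
        | zero => rfl
        | succ i' =>
          simp only [List.getElem?_cons_succ]
          exact List.getElem?_take_of_lt (by omega)
      have hdr : (t.drop (N - 1)).drop i = (c :: t).drop (i + N) := by
        rw [List.drop_drop,
          show i + N = (N - 1 + i) + 1 by omega, List.drop_succ_cons]
      rw [hdr, hch, List.append_assoc, ← pvStrided_drop (c :: t) N i hN]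

lemma pvChunk_cols (N : Nat) (hN : 1 ≤ N) (L : List Char) :
    pvChunkLoop N (List.replicate N []) L
      = (List.range N).map (fun i => pvStrided N (L.drop i)) := by
  apply List.ext_getElem?
  intro i
  rw [pvChunk_get? N hN (List.replicate N []) L (by simp) i]
  by_cases hi : i < N
  · simp [List.getElem?_replicate, hi, List.getElem?_range hi]
  · have h1 : (List.replicate N ([] : List Char))[i]? = none := by
      simp [List.getElem?_replicate, hi]
    have h2 : ((List.range N).map (fun i => pvStrided N (L.drop i)))[i]? = none := by
      rw [List.getElem?_eq_none_iff]
      simp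
      omega
    rw [h1, h2]
    rfl

lemma pvSideA (text : String) (n : Int) (hn : 0 < n) :
    skip_v2 text n = String.mk (((List.range n.toNat).map
      (fun i => pvStrided n.toNat (text.toList.drop i))).flatten) := by
  unfold skip_v2
  set L := text.toList with hL
  set N := n.toNat with hNdef
  have hNn : (N : Int) = n := Int.toNat_of_nonneg (by omega)
  have hN1 : 1 ≤ N := by omega
  set M : Int := -(PySem.Int.floordiv (-(L.length : Int)) n) with hM
  have hMed : PySem.Int.floordiv (-(L.length : Int)) n = (-(L.length : Int)) / n :=
    PySem.Int.floordiv_eq_ediv_of_pos (by omega)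
  have hMub : (L.length : Int) ≤ M * n := by
    have h1 : (-(L.length : Int)) / n * n ≤ -(L.length : Int) :=
      Int.ediv_mul_le _ (by omega)
    rw [hM, hMed, neg_mul]
    linarith
  have hM0 : 0 ≤ M := by
    by_contra hc
    push_neg at hc
    have h2 : M * n ≤ -1 * n := mul_le_mul_of_nonneg_right (by omega) (by omega)
    have h3 : (0 : Int) ≤ (L.length : Int) := by positivity
    nlinarith
  have hMlen : L.length ≤ M.toNat * N := by
    have hcast : ((M.toNat * N : Nat) : Int) = M * n := by
      push_cast [Int.toNat_of_nonneg hM0, hNn]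
      ring
    have h4 := hMub.trans_eq hcast.symm
    exact_mod_cast h4
  congr 1
  rw [PySem.List.pyRange_one 0 n, List.foldl_map,
    show ((n : Int) - 0).toNat = N by omega]
  have key : ∀ (r : List Char) (k : Nat),
      (PySem.List.pyRange 0 M 1).foldl (fun r j =>
        if (0 : Int) + (k : Int) + j * n < (L.length : Int) then
          match PySem.List.pyGet? L ((0 : Int) + (k : Int) + j * n) with
          | some c => r ++ [c]
          | none => r
        else r) r = r ++ pvStrided N (L.drop k) := by
    intro r k
    rw [show M = ((M.toNat : Nat) : Int) from (Int.toNat_of_nonneg hM0).symm,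
      PySem.List.pyRange_one 0 ((M.toNat : Nat) : Int), List.foldl_map,
      show (((M.toNat : Nat) : Int) - 0).toNat = M.toNat by omega]
    have key2 : ∀ (r : List Char) (j : Nat),
        (if (0 : Int) + (k : Int) + ((0 : Int) + (j : Int)) * n < (L.length : Int) then
          match PySem.List.pyGet? L ((0 : Int) + (k : Int) + ((0 : Int) + (j : Int)) * n) with
          | some c => r ++ [c]
          | none => r
        else r) = r ++ (L[k + j * N]?.toList) := by
      intro r j
      rw [show (0 : Int) + (k : Int) + ((0 : Int) + (j : Int)) * n = ((k + j * N : Nat) : Int)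
        from by rw [← hNn]; push_cast; ring]
      simp only [PySem.List.pyGet?_natCast]
      by_cases h : k + j * N < L.length
      · rw [if_pos (by exact_mod_cast h : ((k + j * N : Nat) : Int) < (L.length : Int)),
          List.getElem?_eq_getElem h]
        rfl
      · have hnone : L[k + j * N]? = none := List.getElem?_eq_none_iff.mpr (by omega)
        rw [if_neg (by exact_mod_cast h : ¬ ((k + j * N : Nat) : Int) < (L.length : Int)), hnone]
        simp
    exact (pvFoldlExt _ _ key2 (List.range M.toNat) r).trans
      (pvInner L N hN1 M.toNat k r (by omega))
  exact (pvFoldlExt _ _ (fun r k => key r k) (List.range N) []).trans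
    (by rw [pvFoldlAppend]; simp)

-- ===== VERDICT (by name: the statement is the Claim_ definition above) =====
theorem skip_v2_spec : Claim_equal_skip_v2 := by
  intro text n _
  unfold Spec_skip_v2
  by_cases hn : n ≤ 0
  · unfold skip_v2 skip_v2_alt
    rw [PySem.List.pyRange_one_eq_nil hn, if_pos hn]
    rfl
  · push_neg at hn
    rw [pvSideA text n hn]
    unfold skip_v2_alt
    rw [if_neg (by omega), pvChunk_cols n.toNat (by omega) text.toList]
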